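-- pv_equiv track=rewrite | github.com/Mohit5840-cell/AI_lab_ma3206 | Lab_4/Task_B/code.py | calculate_leaf_depths
-- ===== SOURCE A (Python) =====
-- def calculate_leaf_depths(assignments, graph):
--     """Calculates the longest path from each node to a leaf for the heuristic."""
--     depths = {}
--     def get_depth(node):
--         if node in depths:
--             return depths[node]
--         if not graph[node]:
--             depths[node] = 1
--             return 1
--         depths[node] = 1 + max(get_depth(neighbor) for neighbor in graph[node])
--         return depths[node]
--
--     for a in assignments:
--         get_depth(a)
--     return depths
-- ===== SOURCE B (Python) =====
-- def calculate_leaf_depths(assignments, graph):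
--     """Calculates the longest path from each node to a leaf for the heuristic."""
--     depths = {}
--     for a in assignments:
--         stack = [a]
--         while stack:
--             node = stack.pop()
--             if node in depths:
--                 continue
--             children = graph[node]
--             pending = [c for c in children if c not in depths]
--             if pending:
--                 stack.append(node)
--                 stack.extend(reversed(pending))
--             else:
--                 depths[node] = 1 + max((depths[c] for c in children), default=0)
--     return depths
-- ===== Notes on version B (the rewrite author's own statement) =====
-- stated objective: alternative
-- what changed: The recursive memoized DFS helper (get_depth with Python-level recursion) is replaced by an iterative explicit-stack post-order traversal: pop a node, skip it if memoized, resolve it when all children have depths, otherwise re-push it beneath its unresolved children; same depths dict, same keys and insertion order.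
import Mathlib
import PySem

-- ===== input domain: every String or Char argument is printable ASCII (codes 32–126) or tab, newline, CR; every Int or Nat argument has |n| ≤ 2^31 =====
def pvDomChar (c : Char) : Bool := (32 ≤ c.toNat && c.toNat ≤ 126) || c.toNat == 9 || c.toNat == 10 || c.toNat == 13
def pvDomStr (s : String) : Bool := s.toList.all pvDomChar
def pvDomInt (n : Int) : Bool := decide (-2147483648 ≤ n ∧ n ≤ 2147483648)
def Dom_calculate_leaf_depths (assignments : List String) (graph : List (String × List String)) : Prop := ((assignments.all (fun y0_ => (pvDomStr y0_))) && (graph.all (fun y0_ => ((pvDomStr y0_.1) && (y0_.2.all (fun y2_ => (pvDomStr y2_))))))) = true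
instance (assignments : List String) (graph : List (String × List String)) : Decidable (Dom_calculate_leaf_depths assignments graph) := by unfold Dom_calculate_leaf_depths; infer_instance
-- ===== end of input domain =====

-- B replaces A's recursive memoized DFS by an iterative explicit-stack post-order loop
-- (same memo dict, same insertion order); objective: alternative decomposition, same cost.

-- ===== PORT A =====
-- graph[node]: dict lookup (none = KeyError)
def pvAdj (graph : List (String × List String)) (n : String) : Option (List String) :=
  (PySem.Dict.mk graph).get? n

-- Port of A's recursive `get_depth` (memoized DFS).  The fuel argument only guards
-- recursion depth: `none` is where the Python raises (KeyError on a missing graph key,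
-- RecursionError on a reachable cycle); inside Pre_ the fuel given below never runs out.
-- The inner foldl is the generator `max(get_depth(neighbor) for neighbor in graph[node])`.
def pvDfsA (graph : List (String × List String)) :
    Nat → PySem.Dict String Int → String → Option (PySem.Dict String Int × Int)
  | 0, _, _ => none
  | f+1, d, node =>
    match d.get? node with
    | some v => some (d, v)
    | none =>
      match pvAdj graph node with
      | none => none
      | some [] => some (d.insert node 1, 1)
      | some (c :: rest) =>
        match pvDfsA graph f d c with
        | none => none
        | some (d1, v1) =>
          match rest.foldl (fun st c' => st.bind (fun p =>
              (pvDfsA graph f p.1 c').map (fun q => (q.1, max p.2 q.2)))) (some (d1, v1)) with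
          | none => none
          | some (dm, m) => some (dm.insert node (1 + m), 1 + m)

def calculate_leaf_depths (assignments : List String) (graph : List (String × List String)) : List (String × Int) :=
  ((assignments.foldl
      (fun st a => st.bind (fun d => (pvDfsA graph (graph.length + 2) d a).map (·.1)))
      (some PySem.Dict.empty)).getD PySem.Dict.empty).items

-- ===== PORT B =====
def pvChildBound (graph : List (String × List String)) : Nat :=
  (graph.map (fun p => p.2.length)).foldl max 0

-- fuel bound for the stack machine (only a totality guard; never reached inside Pre_)
def pvCost (S : Nat) : Nat → Nat
  | 0 => 1
  | i+1 => (S + 1) * (pvCost S i + 1) + 2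

-- Port of B's `while stack` loop: pop, skip if memoized, else either resolve the node from
-- its children's depths or re-push it below its unresolved children.  `none` = exception.
def pvMachine (graph : List (String × List String)) :
    Nat → PySem.Dict String Int → List String → Option (PySem.Dict String Int)
  | _, d, [] => some d
  | 0, _, _ :: _ => none
  | f+1, d, node :: stack =>
    if d.contains node then pvMachine graph f d stack
    else
      match pvAdj graph node with
      | none => none
      | some children =>
        match children.filter (fun c => !(d.contains c)) with
        | [] =>
          pvMachine graph f
            (d.insert node (1 + (match children with
              | [] => (0 : Int)
              | c0 :: rest => rest.foldl (fun a c => max a (d.getD c 0)) (d.getD c0 0))))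
            stack
        | pending => pvMachine graph f d (pending ++ node :: stack)

def calculate_leaf_depths_alt (assignments : List String) (graph : List (String × List String)) : List (String × Int) :=
  ((assignments.foldl
      (fun st a => st.bind (fun d => pvMachine graph (pvCost (pvChildBound graph) (graph.length + 1)) d [a]))
      (some PySem.Dict.empty)).getD PySem.Dict.empty).items

-- ===== PRECONDITION & SPEC =====
-- `pvOk graph i n` — a closed-form shape condition on the graph (NOT a run of either port:
-- it keeps no depths, no memo dict and no stack): n is a key of graph and every path of
-- children out of n stays inside the keys of graph and has length < i.  At i = |graph|+1
-- this says exactly: every node reachable from n is a key and no cycle is reachable.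
def pvOk (graph : List (String × List String)) : Nat → String → Bool
  | 0, _ => false
  | i+1, n =>
    match pvAdj graph n with
    | some cs => cs.all (pvOk graph i)
    | none => false

-- Pre_ holds exactly when every node reachable from the assignments is a key of graph and
-- the reachable subgraph is acyclic — i.e. exactly the inputs on which Python A returns
-- normally instead of raising KeyError (missing key) or RecursionError (reachable cycle).
def Pre_calculate_leaf_depths (assignments : List String) (graph : List (String × List String)) : Prop :=
  ∀ a ∈ assignments, pvOk graph (graph.length + 1) a = true
instance (assignments : List String) (graph : List (String × List String)) : Decidable (Pre_calculate_leaf_depths assignments graph) := by unfold Pre_calculate_leaf_depths; infer_instance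

def pvWitness_calculate_leaf_depths : List String × (List (String × List String)) :=
  (["a", "c"], [("a", ["b", "b"]), ("b", []), ("c", ["a", "b"])])

def Spec_calculate_leaf_depths (assignments : List String) (graph : List (String × List String)) (out : List (String × Int)) : Prop := out = calculate_leaf_depths_alt assignments graph
instance (assignments : List String) (graph : List (String × List String)) (out : List (String × Int)) : Decidable (Spec_calculate_leaf_depths assignments graph out) := by unfold Spec_calculate_leaf_depths; infer_instance

-- ===== CLAIM (what is proved, stated in full; the proofs are below) =====
def Claim_equal_calculate_leaf_depths : Prop := ∀ (assignments : List String) (graph : List (String × List String)), Dom_calculate_leaf_depths assignments graph → Pre_calculate_leaf_depths assignments graph → Spec_calculate_leaf_depths assignments graph (calculate_leaf_depths assignments graph)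

-- ===== LEMMAS AND PROOFS =====

-- the children loop of pvDfsA, named for the proofs
def pvFold (g : List (String × List String)) (f : Nat)
    (st : Option (PySem.Dict String Int × Int)) (cs : List String) :
    Option (PySem.Dict String Int × Int) :=
  cs.foldl (fun st c' => st.bind (fun p =>
      (pvDfsA g f p.1 c').map (fun q => (q.1, max p.2 q.2)))) st

lemma pvDfsA_succ (g : List (String × List String)) (f : Nat) (d : PySem.Dict String Int) (node : String) :
    pvDfsA g (f+1) d node =
      match d.get? node with
      | some v => some (d, v)
      | none =>
        match pvAdj g node with
        | none => none
        | some [] => some (d.insert node 1, 1)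
        | some (c :: rest) =>
          match pvDfsA g f d c with
          | none => none
          | some (d1, v1) =>
            match pvFold g f (some (d1, v1)) rest with
            | none => none
            | some (dm, m) => some (dm.insert node (1 + m), 1 + m) := rfl

lemma pvFold_nil (g : List (String × List String)) (f : Nat) (st : Option (PySem.Dict String Int × Int)) :
    pvFold g f st [] = st := rfl

lemma pvFold_none (g : List (String × List String)) (f : Nat) (cs : List String) :
    pvFold g f none cs = none := by
  induction cs with
  | nil => rfl
  | cons c cs ih => simpa [pvFold, List.foldl_cons] using ih

lemma pvFold_cons (g : List (String × List String)) (f : Nat) (d : PySem.Dict String Int)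
    (acc : Int) (c : String) (cs : List String) :
    pvFold g f (some (d, acc)) (c :: cs) =
      match pvDfsA g f d c with
      | none => none
      | some (d1, v) => pvFold g f (some (d1, max acc v)) cs := by
  cases h : pvDfsA g f d c with
  | none =>
    simp only [pvFold, List.foldl_cons, Option.bind_some, h, Option.map_none]
    exact pvFold_none g f cs
  | some p =>
    simp only [pvFold, List.foldl_cons, Option.bind_some, h, Option.map_some]

lemma pvMachine_nil (g : List (String × List String)) (f : Nat) (d : PySem.Dict String Int) :
    pvMachine g f d [] = some d := by cases f <;> rfl

lemma pvMachine_cons (g : List (String × List String)) (f : Nat) (d : PySem.Dict String Int)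
    (node : String) (stack : List String) :
    pvMachine g (f+1) d (node :: stack) =
      if d.contains node then pvMachine g f d stack
      else
        match pvAdj g node with
        | none => none
        | some children =>
          match children.filter (fun c => !(d.contains c)) with
          | [] =>
            pvMachine g f
              (d.insert node (1 + (match children with
                | [] => (0 : Int)
                | c0 :: rest => rest.foldl (fun a c => max a (d.getD c 0)) (d.getD c0 0))))
              stack
          | pending => pvMachine g f d (pending ++ node :: stack) := rfl

lemma pvContains_true {d : PySem.Dict String Int} {k : String} {w : Int}
    (h : d.get? k = some w) : d.contains k = true := by
  rw [PySem.Dict.contains_eq_isSome_get?, h]; rfl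

lemma pvContains_false {d : PySem.Dict String Int} {k : String}
    (h : d.get? k = none) : d.contains k = false := by
  rw [PySem.Dict.contains_eq_isSome_get?, h]; rfl

lemma pvOk_mono (g : List (String × List String)) :
    ∀ i n, pvOk g i n = true → pvOk g (i+1) n = true := by
  intro i
  induction i with
  | zero => intro n h; simp [pvOk] at h
  | succ i ih =>
    intro n h
    unfold pvOk at h ⊢
    cases hadj : pvAdj g n with
    | none => simp only [hadj] at h; exact absurd h (by simp)
    | some cs =>
      simp only [hadj, List.all_eq_true] at h ⊢
      exact fun c hc => ih c (h c hc)

lemma pvOk_le (g : List (String × List String)) {i j : Nat} (hij : i ≤ j) {n : String}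
    (h : pvOk g i n = true) : pvOk g j n = true := by
  induction j, hij using Nat.le_induction with
  | base => exact h
  | succ j hj ih => exact pvOk_mono g j n ih

lemma pvCost_pos (S i : Nat) : 1 ≤ pvCost S i := by
  cases i with
  | zero => simp [pvCost]
  | succ i => simp only [pvCost]; omega

lemma pvCost_le_succ (S i : Nat) : pvCost S i ≤ pvCost S (i+1) := by
  simp only [pvCost]
  have h : pvCost S i + 1 ≤ (S + 1) * (pvCost S i + 1) := Nat.le_mul_of_pos_left _ (by omega)
  omega

lemma pvCost_mono (S : Nat) {i j : Nat} (h : i ≤ j) : pvCost S i ≤ pvCost S j := by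
  induction j, h using Nat.le_induction with
  | base => exact le_rfl
  | succ j hj ih => exact ih.trans (pvCost_le_succ S j)

lemma pvChildBound_spec (g : List (String × List String)) {n : String} {cs : List String}
    (h : pvAdj g n = some cs) : cs.length ≤ pvChildBound g := by
  have hm : (n, cs) ∈ g := PySem.Dict.mem_items_of_get?_eq_some _ h
  have hmem : cs.length ∈ g.map (fun p => p.2.length) := List.mem_map.mpr ⟨(n, cs), hm, rfl⟩
  exact (PySem.List.le_foldl_max (g.map (fun p => p.2.length)) 0).2 _ hmem

def pvExt (d d' : PySem.Dict String Int) : Prop :=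
  ∀ k w, d.get? k = some w → d'.get? k = some w

lemma pvExt_isSome {d d' : PySem.Dict String Int} (h : pvExt d d') {k : String}
    (hk : (d.get? k).isSome) : (d'.get? k).isSome := by
  obtain ⟨w, hw⟩ := Option.isSome_iff_exists.mp hk
  rw [h k w hw]; rfl

lemma pvDfsA_memo (g : List (String × List String)) (f : Nat) (d : PySem.Dict String Int)
    {n : String} {w : Int} (h : d.get? n = some w) {r : PySem.Dict String Int × Int}
    (hr : pvDfsA g f d n = some r) : r = (d, w) := by
  cases f with
  | zero => simp [pvDfsA] at hr
  | succ f =>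
    rw [pvDfsA_succ] at hr
    simp only [h] at hr
    exact (Option.some_inj.mp hr).symm

lemma pvFold_memo (g : List (String × List String)) (f : Nat) :
    ∀ (cs : List String) (d : PySem.Dict String Int) (acc : Int) (r : PySem.Dict String Int × Int),
      (∀ c ∈ cs, (d.get? c).isSome) → pvFold g f (some (d, acc)) cs = some r → r.1 = d := by
  intro cs
  induction cs with
  | nil => intro d acc r _ h; rw [pvFold_nil] at h; cases Option.some_inj.mp h; rfl
  | cons c cs ih =>
    intro d acc r hall h
    rw [pvFold_cons] at h
    cases hd : pvDfsA g f d c with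
    | none => simp only [hd] at h; exact absurd h (by simp)
    | some p =>
      simp only [hd] at h
      obtain ⟨w, hw⟩ := Option.isSome_iff_exists.mp (hall c (by simp))
      have hp := pvDfsA_memo g f d hw hd
      subst hp
      exact ih d (max acc w) r (fun c' hc' => hall c' (by simp [hc'])) h

-- the combined invariant of A's recursion: the produced value is stored at the node, the
-- memo only grows (pvExt), every new key satisfies pvOk, and the fold value is the max of
-- the final stored child depths.
lemma pvMega (g : List (String × List String)) : ∀ f : Nat,
    (∀ j d n d' v, pvDfsA g f d n = some (d', v) → pvOk g j n = true →
       d'.get? n = some v ∧ pvExt d d' ∧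
       (∀ k, ((d' : PySem.Dict String Int).get? k).isSome → (d.get? k).isSome ∨ pvOk g j k = true)) ∧
    (∀ j cs d acc dm m, pvFold g f (some (d, acc)) cs = some (dm, m) → (∀ c ∈ cs, pvOk g j c = true) →
       (∀ c ∈ cs, ((dm : PySem.Dict String Int).get? c).isSome) ∧ pvExt d dm ∧
       (∀ k, (dm.get? k).isSome → (d.get? k).isSome ∨ pvOk g j k = true) ∧
       m = cs.foldl (fun a c => max a (dm.getD c 0)) acc) := by
  intro f
  induction f with
  | zero =>
    constructor
    · intro j d n d' v h; simp [pvDfsA] at h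
    · intro j cs d acc dm m h _
      cases cs with
      | nil =>
        rw [pvFold_nil] at h
        injection h with h'
        injection h' with h1 h2
        subst h1; subst h2
        exact ⟨by simp, fun k w hk => hk, fun k hk => Or.inl hk, by simp⟩
      | cons c cs => rw [pvFold_cons] at h; simp [pvDfsA] at h
  | succ f ih =>
    have hdfs : ∀ j d n d' v, pvDfsA g (f+1) d n = some (d', v) → pvOk g j n = true →
        d'.get? n = some v ∧ pvExt d d' ∧
        (∀ k, (d'.get? k).isSome → (d.get? k).isSome ∨ pvOk g j k = true) := by
      intro j d n d' v h hok
      rw [pvDfsA_succ] at h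
      cases hget : d.get? n with
      | some w =>
        simp only [hget] at h
        injection h with h'
        injection h' with h1 h2
        subst h1; subst h2
        exact ⟨hget, fun k w hk => hk, fun k hk => Or.inl hk⟩
      | none =>
        simp only [hget] at h
        cases j with
        | zero => simp [pvOk] at hok
        | succ j =>
        cases hadj : pvAdj g n with
        | none => simp only [hadj] at h; exact absurd h (by simp)
        | some cs =>
          simp only [hadj] at h
          have hok' : cs.all (pvOk g j) = true := by
            unfold pvOk at hok; simp only [hadj] at hok; exact hok
          cases cs with
          | nil =>
            injection h with h'
            injection h' with h1 h2
            subst h1; subst h2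
            refine ⟨PySem.Dict.get?_insert_self d n 1, ?_, ?_⟩
            · intro k w hk
              have hne : k ≠ n := fun he => by rw [he, hget] at hk; cases hk
              rw [PySem.Dict.get?_insert, if_neg hne]; exact hk
            · intro k hk
              rw [PySem.Dict.get?_insert] at hk
              by_cases he : k = n
              · exact Or.inr (he ▸ hok)
              · rw [if_neg he] at hk; exact Or.inl hk
          | cons c rest =>
            simp only [List.all_cons, List.all_eq_true, Bool.and_eq_true] at hok'
            obtain ⟨hc, hrest⟩ := hok'
            cases hd1 : pvDfsA g f d c with
            | none => simp only [hd1] at h; exact absurd h (by simp)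
            | some p1 =>
              obtain ⟨d1, v1⟩ := p1
              simp only [hd1] at h
              cases hfm : pvFold g f (some (d1, v1)) rest with
              | none => simp only [hfm] at h; exact absurd h (by simp)
              | some pm =>
                obtain ⟨dm, m⟩ := pm
                simp only [hfm] at h
                injection h with h'
                injection h' with h1 h2
                subst h1; subst h2
                obtain ⟨_, hext1, hnk1⟩ := ih.1 j d c d1 v1 hd1 hc
                obtain ⟨_, hext2, hnk2, _⟩ := ih.2 j rest d1 v1 dm m hfm hrest
                refine ⟨PySem.Dict.get?_insert_self dm n _, ?_, ?_⟩
                · intro k w hk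
                  have hne : k ≠ n := fun he => by rw [he, hget] at hk; cases hk
                  rw [PySem.Dict.get?_insert, if_neg hne]
                  exact hext2 k w (hext1 k w hk)
                · intro k hk
                  rw [PySem.Dict.get?_insert] at hk
                  by_cases he : k = n
                  · exact Or.inr (he ▸ hok)
                  · rw [if_neg he] at hk
                    rcases hnk2 k hk with hk1 | hk1
                    · rcases hnk1 k hk1 with hk2 | hk2
                      · exact Or.inl hk2
                      · exact Or.inr (pvOk_le g (Nat.le_succ j) hk2)
                    · exact Or.inr (pvOk_le g (Nat.le_succ j) hk1)
    have hfold : ∀ j cs d acc dm m, pvFold g (f+1) (some (d, acc)) cs = some (dm, m) →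
        (∀ c ∈ cs, pvOk g j c = true) →
        (∀ c ∈ cs, (dm.get? c).isSome) ∧ pvExt d dm ∧
        (∀ k, (dm.get? k).isSome → (d.get? k).isSome ∨ pvOk g j k = true) ∧
        m = cs.foldl (fun a c => max a (dm.getD c 0)) acc := by
      intro j cs
      induction cs with
      | nil =>
        intro d acc dm m h _
        rw [pvFold_nil] at h
        injection h with h'
        injection h' with h1 h2
        subst h1; subst h2
        exact ⟨by simp, fun k w hk => hk, fun k hk => Or.inl hk, by simp⟩
      | cons c cs ihc =>
        intro d acc dm m h hok
        rw [pvFold_cons] at h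
        cases hd1 : pvDfsA g (f+1) d c with
        | none => simp only [hd1] at h; exact absurd h (by simp)
        | some p1 =>
          obtain ⟨d1, v⟩ := p1
          simp only [hd1] at h
          have hcok : pvOk g j c = true := hok c (by simp)
          obtain ⟨hself, hext1, hnk1⟩ := hdfs j d c d1 v hd1 hcok
          obtain ⟨hmem, hext2, hnk2, hmv⟩ := ihc d1 (max acc v) dm m h (fun x hx => hok x (by simp [hx]))
          have hdmc : dm.get? c = some v := hext2 c v hself
          refine ⟨?_, ?_, ?_, ?_⟩
          · intro x hx
            rcases List.mem_cons.mp hx with rfl | hx'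
            · rw [hdmc]; rfl
            · exact hmem x hx'
          · exact fun k w hk => hext2 k w (hext1 k w hk)
          · intro k hk
            rcases hnk2 k hk with hk1 | hk1
            · exact hnk1 k hk1
            · exact Or.inr hk1
          · rw [hmv]
            simp only [List.foldl_cons]
            rw [PySem.Dict.getD_of_get?_eq_some dm 0 hdmc]
    exact ⟨hdfs, hfold⟩

lemma pvTotal (g : List (String × List String)) :
    ∀ i n, pvOk g i n = true → ∀ f d, i ≤ f → ∃ r, pvDfsA g f d n = some r := by
  intro i
  induction i with
  | zero => intro n h; simp [pvOk] at h
  | succ i ih =>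
    intro n hok f d hle
    cases f with
    | zero => omega
    | succ f =>
    have hf : i ≤ f := by omega
    cases hadj : pvAdj g n with
    | none => unfold pvOk at hok; simp only [hadj] at hok; exact absurd hok (by simp)
    | some cs =>
      have hok' : cs.all (pvOk g i) = true := by
        unfold pvOk at hok; simp only [hadj] at hok; exact hok
      simp only [List.all_eq_true] at hok'
      cases hget : d.get? n with
      | some w => exact ⟨(d, w), by rw [pvDfsA_succ]; simp [hget]⟩
      | none =>
        cases cs with
        | nil => exact ⟨(d.insert n 1, 1), by rw [pvDfsA_succ]; simp [hget, hadj]⟩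
        | cons c rest =>
          obtain ⟨⟨d1, v1⟩, hd1⟩ := ih c (hok' c (by simp)) f d hf
          have hft : ∀ (cs' : List String), (∀ x ∈ cs', pvOk g i x = true) →
              ∀ d0 acc, ∃ r, pvFold g f (some (d0, acc)) cs' = some r := by
            intro cs'
            induction cs' with
            | nil => intro _ d0 acc; exact ⟨(d0, acc), pvFold_nil g f _⟩
            | cons x t iht =>
              intro hx d0 acc
              obtain ⟨⟨dx, vx⟩, hdx⟩ := ih x (hx x (by simp)) f d0 hf
              obtain ⟨r, hr⟩ := iht (fun y hy => hx y (by simp [hy])) dx (max acc vx)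
              exact ⟨r, by rw [pvFold_cons]; simp only [hdx]; exact hr⟩
          obtain ⟨⟨dm, m⟩, hfm⟩ := hft rest (fun y hy => hok' y (by simp [hy])) d1 v1
          exact ⟨(dm.insert n (1 + m), 1 + m), by
            rw [pvDfsA_succ]; simp only [hget, hadj, hd1, hfm]⟩

lemma pvMachine_mono (g : List (String × List String)) :
    ∀ f d s r, pvMachine g f d s = some r → ∀ f', f ≤ f' → pvMachine g f' d s = some r := by
  intro f
  induction f with
  | zero =>
    intro d s r h f' _
    cases s with
    | nil => rw [pvMachine_nil] at h ⊢; exact h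
    | cons n st => simp [pvMachine] at h
  | succ f ih =>
    intro d s r h f' hf'
    cases s with
    | nil => rw [pvMachine_nil] at h ⊢; exact h
    | cons n st =>
      cases f' with
      | zero => omega
      | succ f'' =>
        have hff : f ≤ f'' := by omega
        rw [pvMachine_cons] at h ⊢
        by_cases hc : d.contains n
        · rw [if_pos hc] at h ⊢; exact ih d st r h f'' hff
        · rw [if_neg hc] at h ⊢
          cases hadj : pvAdj g n with
          | none => simp only [hadj] at h; exact absurd h (by simp)
          | some cs =>
            simp only [hadj] at h ⊢
            cases hfil : cs.filter (fun c => !(d.contains c)) with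
            | nil => simp only [hfil] at h ⊢; exact ih _ _ r h f'' hff
            | cons p ps => simp only [hfil] at h ⊢; exact ih _ _ r h f'' hff

-- the simulation: one successful recursive call of A is one stretch of B's stack machine
lemma pvSIM (g : List (String × List String)) :
    ∀ i n, pvOk g i n = true →
    ∀ f d d' v, pvDfsA g f d n = some (d', v) →
    ∀ stack fm r, pvMachine g fm d' stack = some r →
    pvMachine g (fm + pvCost (pvChildBound g) i) d (n :: stack) = some r := by
  intro i
  induction i using Nat.strong_induction_on with
  | _ i IH =>
  intro n hok f d d' v hd stack fm r hm
  by_cases hex : ∃ j, j < i ∧ pvOk g j n = true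
  · obtain ⟨j, hj, hjok⟩ := hex
    have h := IH j hj n hjok f d d' v hd stack fm r hm
    exact pvMachine_mono g _ _ _ _ h _
      (by have := pvCost_mono (pvChildBound g) (le_of_lt hj); omega)
  · cases i with
    | zero => simp [pvOk] at hok
    | succ i' =>
    have hnot : ¬ pvOk g i' n = true := fun h => hex ⟨i', Nat.lt_succ_self i', h⟩
    cases f with
    | zero => simp [pvDfsA] at hd
    | succ f' =>
    rw [pvDfsA_succ] at hd
    have hcost1 : 1 ≤ pvCost (pvChildBound g) (i'+1) := pvCost_pos _ _
    cases hget : d.get? n with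
    | some w =>
      simp only [hget] at hd
      injection hd with hd'
      injection hd' with h1 h2
      subst h1; subst h2
      obtain ⟨t, ht⟩ : ∃ t, fm + pvCost (pvChildBound g) (i'+1) = t + 1 :=
        ⟨fm + pvCost (pvChildBound g) (i'+1) - 1, by omega⟩
      rw [ht, pvMachine_cons, if_pos (pvContains_true hget)]
      exact pvMachine_mono g _ _ _ _ hm t (by omega)
    | none =>
      simp only [hget] at hd
      cases hadj : pvAdj g n with
      | none => simp only [hadj] at hd; exact absurd hd (by simp)
      | some cs =>
        simp only [hadj] at hd
        have hok' : cs.all (pvOk g i') = true := by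
          unfold pvOk at hok; simp only [hadj] at hok; exact hok
        cases cs with
        | nil =>
          injection hd with hd'
          injection hd' with h1 h2
          subst h1; subst h2
          obtain ⟨t, ht⟩ : ∃ t, fm + pvCost (pvChildBound g) (i'+1) = t + 1 :=
            ⟨fm + pvCost (pvChildBound g) (i'+1) - 1, by omega⟩
          rw [ht, pvMachine_cons, if_neg (by rw [pvContains_false hget]; simp)]
          simp only [hadj, List.filter_nil]
          have h10 : (1 : Int) + 0 = 1 := by norm_num
          rw [h10]
          exact pvMachine_mono g _ _ _ _ hm t (by omega)
        | cons c rest =>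
          simp only [List.all_cons, Bool.and_eq_true] at hok'
          obtain ⟨hc, hrest'⟩ := hok'
          have hrest : ∀ x ∈ rest, pvOk g i' x = true := by
            simpa [List.all_eq_true] using hrest'
          cases hd1 : pvDfsA g f' d c with
          | none => simp only [hd1] at hd; exact absurd hd (by simp)
          | some p1 =>
            obtain ⟨d1, v1⟩ := p1
            simp only [hd1] at hd
            cases hfm : pvFold g f' (some (d1, v1)) rest with
            | none => simp only [hfm] at hd; exact absurd hd (by simp)
            | some pm =>
              obtain ⟨dm, m⟩ := pm
              simp only [hfm] at hd
              injection hd with hd'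
              injection hd' with h1 h2
              subst h1; subst h2
              have hfold2 : pvFold g f' (some (d, v1)) (c :: rest) = some (dm, m) := by
                rw [pvFold_cons]; simp only [hd1, max_self]; exact hfm
              have hokall : ∀ x ∈ c :: rest, pvOk g i' x = true := by
                intro x hx; rcases List.mem_cons.mp hx with rfl | hx'
                · exact hc
                · exact hrest x hx'
              obtain ⟨hmem, hext, hnk, hmval⟩ := (pvMega g f').2 i' (c :: rest) d v1 dm m hfold2 hokall
              obtain ⟨hcself, hext1, _⟩ := (pvMega g f').1 i' d c d1 v1 hd1 hc
              obtain ⟨_, hext2, _, _⟩ := (pvMega g f').2 i' rest d1 v1 dm m hfm hrest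
              have hdmc : dm.get? c = some v1 := hext2 c v1 hcself
              have hdmn : dm.get? n = none := by
                cases hh : dm.get? n with
                | none => rfl
                | some w =>
                  rcases hnk n (by rw [hh]; rfl) with hs | hokn
                  · rw [hget] at hs; cases hs
                  · exact absurd hokn hnot
              -- the resolving pop of n over the completed memo dm
              have hm2 : pvMachine g (fm + 1) dm (n :: stack) = some r := by
                rw [pvMachine_cons, if_neg (by rw [pvContains_false hdmn]; simp)]
                have hfil : (c :: rest).filter (fun x => !(dm.contains x)) = [] := by
                  apply List.filter_eq_nil_iff.mpr
                  intro x hx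
                  obtain ⟨w, hw⟩ := Option.isSome_iff_exists.mp (hmem x hx)
                  simp [pvContains_true hw]
                simp only [hadj, hfil]
                have hmax : rest.foldl (fun a c' => max a (dm.getD c' 0)) (dm.getD c 0) = m := by
                  rw [hmval]
                  simp only [List.foldl_cons]
                  rw [PySem.Dict.getD_of_get?_eq_some dm 0 hdmc, max_self]
                rw [hmax]
                exact hm
              -- the stack segment that resolves the pending children
              have simfold : ∀ (cs2 : List String), (∀ x ∈ cs2, pvOk g i' x = true) →
                  ∀ (d0 dd : PySem.Dict String Int) (acc2 : Int) (dm2 : PySem.Dict String Int) (m2 : Int),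
                  (∀ k, (d0.get? k).isSome → (dd.get? k).isSome) →
                  pvFold g f' (some (dd, acc2)) cs2 = some (dm2, m2) →
                  ∀ L fm0 r0, pvMachine g fm0 dm2 L = some r0 →
                  pvMachine g (fm0 + cs2.length * (pvCost (pvChildBound g) i' + 1)) dd
                    (cs2.filter (fun x => !(d0.contains x)) ++ L) = some r0 := by
                intro cs2
                induction cs2 with
                | nil =>
                  intro _ d0 dd acc2 dm2 m2 _ hfold L fm0 r0 hmL
                  rw [pvFold_nil] at hfold
                  injection hfold with hfold'
                  injection hfold' with h1 h2
                  subst h1; subst h2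
                  simpa using hmL
                | cons x cs2 ihc =>
                  intro hok2 d0 dd acc2 dm2 m2 hsub hfold L fm0 r0 hmL
                  rw [pvFold_cons] at hfold
                  cases hdx : pvDfsA g f' dd x with
                  | none => simp only [hdx] at hfold; exact absurd hfold (by simp)
                  | some px =>
                    obtain ⟨dd1, vx⟩ := px
                    simp only [hdx] at hfold
                    have hexpand : (cs2.length + 1) * (pvCost (pvChildBound g) i' + 1)
                        = cs2.length * (pvCost (pvChildBound g) i' + 1) + (pvCost (pvChildBound g) i' + 1) := by ring
                    by_cases hx0 : d0.contains x
                    · obtain ⟨w, hw⟩ := Option.isSome_iff_exists.mp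
                        (hsub x (by rw [PySem.Dict.contains_eq_isSome_get?] at hx0; exact hx0))
                      obtain ⟨hq1, hq2⟩ : dd1 = dd ∧ vx = w := by
                        have hmm := pvDfsA_memo g f' dd hw hdx
                        exact ⟨congrArg Prod.fst hmm, congrArg Prod.snd hmm⟩
                      rw [hq1, hq2] at hfold
                      have hrec := ihc (fun y hy => hok2 y (by simp [hy])) d0 dd (max acc2 w) dm2 m2 hsub hfold L fm0 r0 hmL
                      rw [List.filter_cons, if_neg (by simp [hx0])]
                      refine pvMachine_mono g _ _ _ _ hrec _ ?_
                      simp only [List.length_cons, hexpand]; omega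
                    · rw [List.filter_cons, if_pos (by simp [hx0])]
                      by_cases hxin : (dd.get? x).isSome
                      · obtain ⟨w, hw⟩ := Option.isSome_iff_exists.mp hxin
                        obtain ⟨hq1, hq2⟩ : dd1 = dd ∧ vx = w := by
                          have hmm := pvDfsA_memo g f' dd hw hdx
                          exact ⟨congrArg Prod.fst hmm, congrArg Prod.snd hmm⟩
                        rw [hq1, hq2] at hfold
                        have hrec := ihc (fun y hy => hok2 y (by simp [hy])) d0 dd (max acc2 w) dm2 m2 hsub hfold L fm0 r0 hmL
                        have hpos : 0 < (cs2.length + 1) * (pvCost (pvChildBound g) i' + 1) :=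
                          Nat.mul_pos (by omega) (by omega)
                        obtain ⟨t, ht⟩ : ∃ t, fm0 + (cs2.length + 1) * (pvCost (pvChildBound g) i' + 1) = t + 1 :=
                          ⟨fm0 + (cs2.length + 1) * (pvCost (pvChildBound g) i' + 1) - 1, by omega⟩
                        simp only [List.length_cons]
                        rw [ht, List.cons_append, pvMachine_cons, if_pos (pvContains_true hw)]
                        refine pvMachine_mono g _ _ _ _ hrec t ?_
                        rw [hexpand] at ht; omega
                      · have hokx := hok2 x (by simp)
                        have hsub1 : ∀ k, (d0.get? k).isSome → (dd1.get? k).isSome := by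
                          intro k hk
                          obtain ⟨_, hext', _⟩ := (pvMega g f').1 i' dd x dd1 vx hdx hokx
                          exact pvExt_isSome hext' (hsub k hk)
                        have hrec := ihc (fun y hy => hok2 y (by simp [hy])) d0 dd1 (max acc2 vx) dm2 m2 hsub1 hfold L fm0 r0 hmL
                        have hsimx := IH i' (Nat.lt_succ_self i') x hokx f' dd dd1 vx hdx
                          (cs2.filter (fun y => !(d0.contains y)) ++ L)
                          (fm0 + cs2.length * (pvCost (pvChildBound g) i' + 1)) r0 hrec
                        refine pvMachine_mono g _ _ _ _ hsimx _ ?_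
                        simp only [List.length_cons, hexpand]; omega
              -- now the first pop of n
              cases hfil0 : (c :: rest).filter (fun x => !(d.contains x)) with
              | nil =>
                -- every child already memoized: dm = d and B resolves n in one step
                have hall : ∀ x ∈ c :: rest, (d.get? x).isSome := by
                  intro x hx
                  have hh := List.filter_eq_nil_iff.mp hfil0 x hx
                  rw [PySem.Dict.contains_eq_isSome_get?] at hh
                  exact Option.isSome_iff_ne_none.mpr (by simpa using hh)
                obtain ⟨w, hw⟩ := Option.isSome_iff_exists.mp (hall c (by simp))
                obtain ⟨hq1, hq2⟩ : d1 = d ∧ v1 = w := by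
                  have hmm := pvDfsA_memo g f' d hw hd1
                  exact ⟨congrArg Prod.fst hmm, congrArg Prod.snd hmm⟩
                rw [hq1, hq2] at hfm
                have hdmd : dm = d :=
                  pvFold_memo g f' rest d w (dm, m) (fun y hy => hall y (by simp [hy])) hfm
                rw [hdmd] at hm2
                exact pvMachine_mono g _ _ _ _ hm2 _ (by omega)
              | cons p ps =>
                have hsim := simfold (c :: rest) hokall d d v1 dm m (fun k hk => hk) hfold2
                  (n :: stack) (fm + 1) r hm2
                obtain ⟨t, ht⟩ : ∃ t, fm + pvCost (pvChildBound g) (i'+1) = t + 1 :=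
                  ⟨fm + pvCost (pvChildBound g) (i'+1) - 1, by omega⟩
                rw [ht, pvMachine_cons, if_neg (by rw [pvContains_false hget]; simp)]
                simp only [hadj, hfil0]
                rw [← hfil0]
                refine pvMachine_mono g _ _ _ _ hsim t ?_
                have hlen : rest.length + 1 ≤ pvChildBound g + 1 := by
                  have hcb := pvChildBound_spec g hadj; simp at hcb; omega
                have hmul := Nat.mul_le_mul_right (pvCost (pvChildBound g) i' + 1) hlen
                have hcost : pvCost (pvChildBound g) (i'+1)
                    = (pvChildBound g + 1) * (pvCost (pvChildBound g) i' + 1) + 2 := rfl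
                simp only [List.length_cons] at hsim ⊢
                omega

lemma pvTopLoop (g : List (String × List String)) :
    ∀ (l : List String) (d : PySem.Dict String Int),
      (∀ a ∈ l, pvOk g (g.length + 1) a = true) →
      l.foldl (fun st a => st.bind (fun d => (pvDfsA g (g.length + 2) d a).map (·.1))) (some d)
        = l.foldl (fun st a => st.bind (fun d => pvMachine g (pvCost (pvChildBound g) (g.length + 1)) d [a])) (some d) := by
  intro l
  induction l with
  | nil => intro d _; rfl
  | cons a l ih =>
    intro d hok
    obtain ⟨⟨d1, v1⟩, hd1⟩ := pvTotal g (g.length + 1) a (hok a (by simp)) (g.length + 2) d (by omega)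
    have hmach : pvMachine g (pvCost (pvChildBound g) (g.length + 1)) d [a] = some d1 := by
      have h := pvSIM g (g.length + 1) a (hok a (by simp)) (g.length + 2) d d1 v1 hd1
        [] 0 d1 (pvMachine_nil g 0 d1)
      simpa using h
    simp only [List.foldl_cons, Option.bind_some, hd1, Option.map_some, hmach]
    exact ih d1 (fun x hx => hok x (by simp [hx]))

-- ===== VERDICT (by name: the statement is the Claim_ definition above) =====
theorem calculate_leaf_depths_spec : Claim_equal_calculate_leaf_depths := by
  intro assignments graph _ hpre
  unfold Spec_calculate_leaf_depths calculate_leaf_depths calculate_leaf_depths_alt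
  rw [pvTopLoop graph assignments PySem.Dict.empty hpre]
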